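-- pv_equiv track=rewrite | github.com/nguyenrtm/DDI-KT-2024 | embed/get_embed_sentence_level.py | map_new_tokenize
-- ===== SOURCE A (Python) =====
-- def map_new_tokenize(words, sentence_tokenize):
--     new_tokenize_ids = []
--     for word in words:
--         word = word.lower()
--         status = {
--             'min_id': 999,
--             'max_id': 0
--         }
--         for token_id, token in enumerate(sentence_tokenize):
--             if token[:2] == "##":
--                 continue
--             if token in word and word[0:len(token)] == token:
--                 # Get longest word
--                 min_id = token_id
--                 max_id = token_id+1
--                 while True:
--                     if sentence_tokenize[max_id][:2] != "##":
--                         break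
--                     else:
--                         max_id += 1
--                 word_determined = "".join("".join(sentence_tokenize[min_id:max_id]).split("##"))
--                 if word_determined == word:
--                     status['min_id'] = min_id
--                     status['max_id'] = max_id-1
--                     # breakpoint()
--                     break
--
--         if status['min_id'] > status['max_id']:
--             # If some how we missed, we take the first id
--             status['min_id'] = 0
--             status['max_id'] = 0
--
--         new_tokenize_ids.append(status)
--     return new_tokenize_ids
-- ===== SOURCE B (Python) =====
-- def map_new_tokenize(words, sentence_tokenize):
--     # One pass over the tokens: each non-"##" token starts a group with its "##"
--     # continuations; index the first group per reconstructed word in a dict, then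
--     # answer every word with a single O(1) lookup.  A group is indexed only if its
--     # reconstruction passes A's own acceptance test against the group's first token.
--     n = len(sentence_tokenize)
--     spans = {}
--     for i, t in enumerate(sentence_tokenize):
--         if t[:2] == "##":
--             continue
--         j = i + 1
--         while j < n and sentence_tokenize[j][:2] == "##":
--             j += 1
--         recon = "".join("".join(sentence_tokenize[i:j]).split("##"))
--         if t in recon and recon[0:len(t)] == t and recon not in spans:
--             spans[recon] = {'min_id': i, 'max_id': j - 1}
--     default = {'min_id': 0, 'max_id': 0}
--     return [dict(spans.get(w.lower(), default)) for w in words]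
-- ===== Notes on version B (the rewrite author's own statement) =====
-- stated objective: faster
-- what changed: Instead of rescanning the whole token list (with its inner continuation walk) once per word, B makes one grouping pass over the tokens that records the first token-id span for each reconstructed word in a dict, then answers every word with a single O(1) lookup.
import Mathlib
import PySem

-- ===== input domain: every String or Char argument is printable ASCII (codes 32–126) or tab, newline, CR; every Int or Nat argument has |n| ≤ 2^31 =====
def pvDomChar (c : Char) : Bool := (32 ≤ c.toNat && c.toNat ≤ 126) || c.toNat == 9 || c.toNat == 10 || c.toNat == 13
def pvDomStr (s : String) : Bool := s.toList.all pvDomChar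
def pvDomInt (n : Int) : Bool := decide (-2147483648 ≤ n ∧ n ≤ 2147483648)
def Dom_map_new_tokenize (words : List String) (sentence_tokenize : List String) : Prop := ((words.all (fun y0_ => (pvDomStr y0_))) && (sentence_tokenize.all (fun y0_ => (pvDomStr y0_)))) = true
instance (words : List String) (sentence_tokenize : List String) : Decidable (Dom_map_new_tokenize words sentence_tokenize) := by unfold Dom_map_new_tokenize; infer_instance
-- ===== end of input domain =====

-- B replaces A's per-word rescan of the whole token list by one grouping pass that
-- indexes the reconstructed words in a dict, then answers each word by lookup.

-- ===== PORT A =====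
-- token[:2] == "##"
def pvAIsCont (t : String) : Bool := PySem.Str.slice t (some 0) (some 2) == "##"

-- the 'while True' loop advancing max_id over "##" continuation tokens, walking the
-- suffix of sentence_tokenize after position m-1; when the suffix runs out Python's
-- sentence_tokenize[max_id] raises IndexError — Pre_map_new_tokenize excludes those
-- inputs, so that case simply stops.
def pvAWhileGo (suffix : List String) (m : Nat) : Nat :=
  match suffix with
  | [] => m
  | t :: rest => if pvAIsCont t then pvAWhileGo rest (m + 1) else m

-- "".join("".join(sentence_tokenize[i:m]).split("##"))  ("##" ≠ "", so split? is some)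
def pvARecon (st : List String) (i m : Nat) : String :=
  PySem.Str.join "" ((PySem.Str.split? (PySem.Str.join "" (PySem.List.slice st (some (i : Int)) (some (m : Int)))) "##").getD [])

-- the inner 'for token_id, token in enumerate(sentence_tokenize)' loop for one
-- (already lowered) word: suffix is the part of st not yet scanned, k its start
-- index; some (min_id, max_id-1) on break, none when the loop runs out.
def pvAInnerGo (st : List String) (word : String) (suffix : List String) (k : Nat) : Option (Int × Int) :=
  match suffix with
  | [] => none
  | token :: rest =>
    if pvAIsCont token then pvAInnerGo st word rest (k + 1)
    else if PySem.Str.isIn token word && (PySem.Str.slice word (some 0) (some (PySem.Str.len token)) == token) then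
      let m := pvAWhileGo rest (k + 1)
      if pvARecon st k m == word then some ((k : Int), (m : Int) - 1)
      else pvAInnerGo st word rest (k + 1)
    else pvAInnerGo st word rest (k + 1)

-- body of the outer loop: the status dict for one word
def pvAStatus (st : List String) (word : String) : PySem.Dict String Int :=
  let status : PySem.Dict String Int := ((PySem.Dict.empty).insert "min_id" 999).insert "max_id" 0
  let status :=
    match pvAInnerGo st (PySem.Str.lower word) st 0 with
    | some (mi, ma) => (status.insert "min_id" mi).insert "max_id" ma
    | none => status
  if status.getD "min_id" 0 > status.getD "max_id" 0 then
    (status.insert "min_id" 0).insert "max_id" 0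
  else status

def map_new_tokenize (words : List String) (sentence_tokenize : List String) : List (List (String × Int)) :=
  words.foldl (fun acc word => acc ++ [(pvAStatus sentence_tokenize word).items]) []

-- ===== PORT B =====
-- t[:2] == "##"
def pvBIsCont (t : String) : Bool := PySem.Str.slice t (some 0) (some 2) == "##"

-- 'while j < n and sentence_tokenize[j][:2] == "##": j += 1', walking the suffix after j-1
def pvBNextGo (suffix : List String) (j : Nat) : Nat :=
  match suffix with
  | [] => j
  | t :: rest => if pvBIsCont t then pvBNextGo rest (j + 1) else j

-- "".join("".join(sentence_tokenize[i:j]).split("##"))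
def pvBRecon (st : List String) (i j : Nat) : String :=
  PySem.Str.join "" ((PySem.Str.split? (PySem.Str.join "" (PySem.List.slice st (some (i : Int)) (some (j : Int)))) "##").getD [])

-- the grouping pass: 'for i, t in enumerate(sentence_tokenize)' building spans
def pvBBuildGo (st : List String) (suffix : List String) (i : Nat) (spans : PySem.Dict String (List (String × Int))) : PySem.Dict String (List (String × Int)) :=
  match suffix with
  | [] => spans
  | t :: rest =>
    if pvBIsCont t then pvBBuildGo st rest (i + 1) spans
    else
      let j := pvBNextGo rest (i + 1)
      let recon := pvBRecon st i j
      let spans' :=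
        if (PySem.Str.isIn t recon && (PySem.Str.slice recon (some 0) (some (PySem.Str.len t)) == t)) && !(spans.contains recon)
        then spans.insert recon [("min_id", (i : Int)), ("max_id", (j : Int) - 1)]
        else spans
      pvBBuildGo st rest (i + 1) spans'

def map_new_tokenize_alt (words : List String) (sentence_tokenize : List String) : List (List (String × Int)) :=
  let spans := pvBBuildGo sentence_tokenize sentence_tokenize 0 PySem.Dict.empty
  words.map (fun w => spans.getD (PySem.Str.lower w) [("min_id", 0), ("max_id", 0)])

-- ===== PRECONDITION & SPEC =====
-- helpers describing A's raise condition (independent of both ports)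
def pvPreCont (t : String) : Bool := PySem.Str.slice t (some 0) (some 2) == "##"
-- index of the first non-"##" token at or after k (st.length if there is none)
def pvPreStop (st : List String) (k : Nat) : Nat := k + ((st.drop k).findIdx (fun t => !pvPreCont t))
-- the word spelled by the token group starting at i
def pvPreRecon (st : List String) (i : Nat) : String :=
  PySem.Str.join "" ((PySem.Str.split? (PySem.Str.join "" (PySem.List.slice st (some (i : Int)) (some ((pvPreStop st (i + 1)) : Int)))) "##").getD [])
-- A's acceptance test 'token in word and word[0:len(token)] == token'
def pvPreCond (t w : String) : Bool := PySem.Str.isIn t w && (PySem.Str.slice w (some 0) (some (PySem.Str.len t)) == t)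
-- index of the last non-"##" token, if any
def pvLastStart (st : List String) : Option Nat :=
  ((List.range st.length).filter (fun i => !pvPreCont (st.getD i ""))).getLast?
-- A raises IndexError on the (already lowered) word lw iff its scan reaches the last
-- group start L with the acceptance test true, i.e. no earlier group both spells lw
-- and passes the test.
def pvRaiseAt (st : List String) (lw : String) : Bool :=
  match pvLastStart st with
  | none => false
  | some L =>
      pvPreCond (st.getD L "") lw &&
      (List.range L).all (fun j =>
        pvPreCont (st.getD j "") || !(decide (pvPreRecon st j = lw) && pvPreCond (st.getD j "") lw))

-- Pre_ excludes exactly the inputs on which A raises IndexError (its continuation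
-- scan runs past the end of sentence_tokenize).
def Pre_map_new_tokenize (words : List String) (sentence_tokenize : List String) : Prop :=
  ∀ w ∈ words, pvRaiseAt sentence_tokenize (PySem.Str.lower w) = false
instance (words : List String) (sentence_tokenize : List String) : Decidable (Pre_map_new_tokenize words sentence_tokenize) := by unfold Pre_map_new_tokenize; infer_instance

def pvWitness_map_new_tokenize : List String × List String := (["ab"], ["a", "##b", "x"])

def Spec_map_new_tokenize (words : List String) (sentence_tokenize : List String) (out : List (List (String × Int))) : Prop := out = map_new_tokenize_alt words sentence_tokenize
instance (words : List String) (sentence_tokenize : List String) (out : List (List (String × Int))) : Decidable (Spec_map_new_tokenize words sentence_tokenize out) := by unfold Spec_map_new_tokenize; infer_instance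

-- ===== CLAIM (what is proved, stated in full; the proofs are below) =====
def Claim_equal_map_new_tokenize : Prop := ∀ (words : List String) (sentence_tokenize : List String), Dom_map_new_tokenize words sentence_tokenize → Pre_map_new_tokenize words sentence_tokenize → Spec_map_new_tokenize words sentence_tokenize (map_new_tokenize words sentence_tokenize)

-- ===== LEMMAS AND PROOFS =====

lemma pvAWhileGo_eq_pvBNextGo (l : List String) (m : Nat) : pvAWhileGo l m = pvBNextGo l m := by
  induction l generalizing m with
  | nil => rfl
  | cons t rest ih =>
    simp only [pvAWhileGo, pvBNextGo, pvAIsCont, pvBIsCont]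
    split <;> simp [ih]

lemma pvAWhileGo_ge (l : List String) (m : Nat) : m ≤ pvAWhileGo l m := by
  induction l generalizing m with
  | nil => exact le_refl m
  | cons t rest ih =>
    simp only [pvAWhileGo]
    split
    · exact le_trans (Nat.le_succ m) (ih (m + 1))
    · exact le_refl m

lemma pvARecon_eq_pvBRecon (st : List String) (i m : Nat) : pvARecon st i m = pvBRecon st i m := rfl

lemma key_lemma (st : List String) (w : String) (suffix : List String) (k : Nat) (d : PySem.Dict String (List (String × Int))) :
    (pvBBuildGo st suffix k d).get? w =
      (d.get? w).or ((pvAInnerGo st w suffix k).map (fun p => [("min_id", p.1), ("max_id", p.2)])) := by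
  induction suffix generalizing k d with
  | nil => simp [pvBBuildGo, pvAInnerGo]
  | cons token rest ih =>
    show (pvBBuildGo st (token :: rest) k d).get? w = _
    rw [pvBBuildGo, pvAInnerGo]
    simp only [pvBIsCont, pvAIsCont, ← pvARecon_eq_pvBRecon, ← pvAWhileGo_eq_pvBNextGo]
    cases hc : (PySem.Str.slice token (some 0) (some 2) == "##") with
    | true => simpa using ih k.succ d
    | false =>
      simp only [Bool.false_eq_true, if_false]
      set m := pvAWhileGo rest (k + 1) with hm
      set recon := pvARecon st k m with hrec
      by_cases hrw : recon = w
      · subst hrw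
        cases hca : (PySem.Str.isIn token recon && (PySem.Str.slice recon (some 0) (some (PySem.Str.len token)) == token)) with
        | true =>
          simp only [Bool.true_and, beq_self_eq_true, if_true]
          cases hct : d.contains recon with
          | true =>
            have hg : ∃ v, d.get? recon = some v := by
              rcases hgg : d.get? recon with _ | v
              · rw [PySem.Dict.get?_eq_none_iff_contains] at hgg; rw [hgg] at hct; cases hct
              · exact ⟨v, rfl⟩
            obtain ⟨v, hv⟩ := hg
            simp only [Bool.not_true, Bool.false_eq_true, if_false]
            rw [ih, hv]
            rfl
          | false =>
            simp only [Bool.not_false, if_true]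
            rw [ih, PySem.Dict.get?_insert_self,
              (PySem.Dict.get?_eq_none_iff_contains d recon).mpr hct]
            rfl
        | false =>
          simp only [Bool.false_and, Bool.false_eq_true, if_false]
          exact ih (k + 1) d
      · have hspans : ∀ val, (if ((PySem.Str.isIn token recon && (PySem.Str.slice recon (some 0) (some (PySem.Str.len token)) == token)) && !(d.contains recon)) = true then d.insert recon val else d).get? w = d.get? w := by
          intro val
          split
          · exact PySem.Dict.get?_insert_of_ne _ _ (fun h => hrw h.symm)
          · rfl
        have hne : (recon == w) = false := by simp [hrw]
        rw [ih, hspans]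
        simp only [hne, Bool.false_eq_true, if_false]
        split <;> rfl

lemma pvAInnerGo_some_le (st : List String) (w : String) (suffix : List String) (k : Nat)
    (a b : Int) (h : pvAInnerGo st w suffix k = some (a, b)) : a ≤ b := by
  induction suffix generalizing k with
  | nil => simp [pvAInnerGo] at h
  | cons token rest ih =>
    simp only [pvAInnerGo] at h
    split at h
    · exact ih (k + 1) h
    · split at h
      · split at h
        · have hm := pvAWhileGo_ge rest (k + 1)
          simp only [Option.some.injEq, Prod.mk.injEq] at h
          obtain ⟨ha, hb⟩ := h
          subst ha; subst hb
          have : (k : Int) + 1 ≤ (pvAWhileGo rest (k + 1) : Int) := by exact_mod_cast hm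
          omega
        · exact ih (k + 1) h
      · exact ih (k + 1) h

lemma status_lemma (st : List String) (word : String) :
    (pvAStatus st word).items =
      (pvBBuildGo st st 0 PySem.Dict.empty).getD (PySem.Str.lower word) [("min_id", 0), ("max_id", 0)] := by
  rw [PySem.Dict.getD_eq_get?_getD, key_lemma st (PySem.Str.lower word) st 0 PySem.Dict.empty]
  unfold pvAStatus
  rcases h : pvAInnerGo st (PySem.Str.lower word) st 0 with _ | ⟨a, b⟩
  · simp [PySem.Dict.empty, PySem.Dict.get?, PySem.Dict.insert, PySem.Dict.getD,
      PySem.Dict.contains]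
  · have hab : a ≤ b := pvAInnerGo_some_le st _ st 0 a b h
    simp only [Option.map_some]
    simp [PySem.Dict.empty, PySem.Dict.get?, PySem.Dict.insert, PySem.Dict.getD,
      PySem.Dict.contains]
    split
    · omega
    · rfl

-- ===== VERDICT (by name: the statement is the Claim_ definition above) =====
theorem map_new_tokenize_spec : Claim_equal_map_new_tokenize := by
  intro words st _ _
  unfold Spec_map_new_tokenize map_new_tokenize map_new_tokenize_alt
  rw [PySem.List.foldl_append_singleton_eq_map]
  simp only [List.nil_append]
  exact List.map_congr_left (fun w _ => status_lemma st w)
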